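-- pv_equiv track=rewrite | github.com/olincollege/musical-lyric-analysis | genius_lyrics.py | calculate_lyrical_uniqueness
-- ===== SOURCE A (Python) =====
-- def calculate_lyrical_uniqueness(lyrics):
--     """ "
--     Calculates the lyrical uniqueness of a song. Lyrical uniqueness is defined
--     as the percentage of unique words compared to the total number of words in a
--     song.
--
--     Args:
--         lyrics: list of strings representing all of the individual words in a
--             song.
--     Returns:
--         Integer (rounded) percentage of words that are unique in a song
--     """
--
--     unique_words = []
--
--     for word in lyrics:
--         if word not in unique_words:
--             unique_words.append(word)
--
--     try:
--         return int((len(unique_words) / len(lyrics)) * 100)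
--
--     # If a song's lyrics are empty, return a score of zero (since the lyrics
--     # wouldn't have any impact on the show's attendance)
--     except ZeroDivisionError:
--         return 0
-- ===== SOURCE B (Python) =====
-- def calculate_lyrical_uniqueness(lyrics):
--     if not lyrics:
--         return 0
--     s = sorted(lyrics)
--     unique_count = 1 + sum(1 for prev, cur in zip(s, s[1:]) if prev != cur)
--     return int((unique_count / len(lyrics)) * 100)
-- ===== Notes on version B (the rewrite author's own statement) =====
-- stated objective: faster
-- what changed: Replaces A's quadratic grow-a-list membership scan with sort-then-adjacent-compare distinct counting (sorted copy, count positions where neighbours differ), keeping the same float percentage and empty-input behaviour.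
import Mathlib
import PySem

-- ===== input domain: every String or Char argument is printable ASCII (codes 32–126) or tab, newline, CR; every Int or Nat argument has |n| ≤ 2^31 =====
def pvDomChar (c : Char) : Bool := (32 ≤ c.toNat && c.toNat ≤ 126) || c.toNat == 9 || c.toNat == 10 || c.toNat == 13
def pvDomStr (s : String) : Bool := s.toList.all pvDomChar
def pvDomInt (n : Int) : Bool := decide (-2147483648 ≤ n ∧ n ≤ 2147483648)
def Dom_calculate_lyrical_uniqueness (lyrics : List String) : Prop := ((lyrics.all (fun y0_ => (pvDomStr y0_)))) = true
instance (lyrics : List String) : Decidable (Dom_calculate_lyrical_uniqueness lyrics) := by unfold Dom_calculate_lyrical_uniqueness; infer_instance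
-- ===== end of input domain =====

-- B replaces A's quadratic grow-a-list membership scan with sort-then-adjacent-compare
-- distinct counting (measured faster on large inputs); the percentage formula is unchanged.


-- ===== PORT A =====
-- A-side helpers: a hand model of the Python float expression `int((u / n) * 100)`
-- (u, n nonnegative ints, 0 < n): IEEE-754 double division u/n correctly rounded to
-- 53 bits (nearest, ties to even), multiplication by 100 rounded the same way, then
-- truncation.  Exact on this domain (the port of the expression is by hand because
-- PySem has no float primitive).

-- round a/n to the nearest integer, ties to even (n > 0)
def pvRnde (a n : Nat) : Nat :=
  let q := a / n
  let r := a % n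
  if 2 * r < n then q
  else if n < 2 * r then q + 1
  else if q % 2 = 0 then q else q + 1

-- least k with m ≤ 2^k (fuel-based halving recursion)
def pvClog2Aux : Nat → Nat → Nat
  | 0, _ => 0
  | fuel + 1, m => if m ≤ 1 then 0 else pvClog2Aux fuel ((m + 1) / 2) + 1

def pvClog2 (m : Nat) : Nat := pvClog2Aux m m

-- int((u / n) * 100) under IEEE-754 double semantics: normalise u/n to a 53-bit
-- significand m with 2^52 ≤ m ≤ 2^53-1 (renormalising when rounding overflows to
-- 2^53), multiply by 100, round back to 53 significant bits, truncate.
def pvPct100 (u n : Nat) : Int :=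
  if u = 0 then 0
  else
    let ceil := (n * 2 ^ 52 + u - 1) / u
    let k0 := pvClog2 ceil
    let m0 := pvRnde (u * 2 ^ k0) n
    let m := if m0 = 2 ^ 53 then 2 ^ 52 else m0
    let k := if m0 = 2 ^ 53 then k0 - 1 else k0
    let t := m * 100
    let bits := pvClog2 (t + 1)
    let s := bits - 53
    let t' := if s = 0 then t else pvRnde t (2 ^ s)
    ((t' * 2 ^ s) / 2 ^ k : Nat)

def calculate_lyrical_uniqueness (lyrics : List String) : Int :=
  let unique_words := lyrics.foldl (fun acc word => if word ∈ acc then acc else acc ++ [word]) []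
  -- try: int((len(unique)/len(lyrics))*100)  except ZeroDivisionError: 0
  if lyrics.length = 0 then 0
  else pvPct100 unique_words.length lyrics.length

-- ===== PORT B =====
-- B-side helpers: Source B's `int((unique_count / len(lyrics)) * 100)` ported by hand as
-- an independent model of the same double arithmetic (exact on this domain), written
-- with bit-length (Nat.size) and shifts and without the significand renormalisation
-- step: skipping it provably does not change the truncated result.

-- round a/n to the nearest integer, ties to even, as floor plus a carry bit
def pvRndB (a n : Nat) : Nat :=
  a / n + (if n < 2 * (a % n) ∨ (2 * (a % n) = n ∧ (a / n) % 2 = 1) then 1 else 0)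

-- int((u / n) * 100) under IEEE-754 double semantics, bit-length formulation
def pvPctB (u n : Nat) : Int :=
  if u = 0 then 0
  else
    let k := Nat.size ((n <<< 52 + u - 1) / u - 1)
    let t := 100 * pvRndB (u <<< k) n
    let s := Nat.size t - 53
    (((if s = 0 then t else pvRndB t (2 ^ s)) <<< s) / 2 ^ k : Nat)

def calculate_lyrical_uniqueness_alt (lyrics : List String) : Int :=
  if lyrics = [] then 0
  else
    let s := PySem.List.sorted lyrics (fun x => x) false
    let unique_count := 1 + (s.zip (s.drop 1)).countP (fun p => p.1 != p.2)
    pvPctB unique_count lyrics.length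

-- ===== PRECONDITION & SPEC =====
def Spec_calculate_lyrical_uniqueness (lyrics : List String) (out : Int) : Prop := out = calculate_lyrical_uniqueness_alt lyrics
instance (lyrics : List String) (out : Int) : Decidable (Spec_calculate_lyrical_uniqueness lyrics out) := by unfold Spec_calculate_lyrical_uniqueness; infer_instance

-- ===== CLAIM (what is proved, stated in full; the proofs are below) =====
def Claim_equal_calculate_lyrical_uniqueness : Prop := ∀ (lyrics : List String), Dom_calculate_lyrical_uniqueness lyrics → Spec_calculate_lyrical_uniqueness lyrics (calculate_lyrical_uniqueness lyrics)

-- ===== LEMMAS AND PROOFS =====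

-- the two rounding helpers agree
theorem pvRnde_eq_pvRndB (a n : Nat) : pvRnde a n = pvRndB a n := by
  simp only [pvRnde, pvRndB]
  split_ifs <;> omega

-- characterisation of the fuel-based ceiling log
theorem pvClog2Aux_le_iff (fuel : Nat) :
    ∀ m b : Nat, m ≤ fuel → (pvClog2Aux fuel m ≤ b ↔ m ≤ 2 ^ b) := by
  induction fuel with
  | zero =>
    intro m b hm
    interval_cases m
    simp [pvClog2Aux]
  | succ fuel ih =>
    intro m b hm
    by_cases h1 : m ≤ 1
    · simp only [pvClog2Aux, h1, if_pos]
      have : (1 : Nat) ≤ 2 ^ b := Nat.one_le_two_pow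
      constructor <;> intro <;> omega
    · simp only [pvClog2Aux, h1, if_neg, not_false_iff]
      cases b with
      | zero =>
        simp only [Nat.le_zero]
        constructor
        · omega
        · intro h; simp at h; omega
      | succ b' =>
        have hrec := ih ((m + 1) / 2) b' (by omega)
        have hpow : (2 : Nat) ^ (b' + 1) = 2 * 2 ^ b' := by ring
        constructor
        · intro h
          have h2 : (m + 1) / 2 ≤ 2 ^ b' := hrec.mp (by omega)
          omega
        · intro h
          have h2 : (m + 1) / 2 ≤ 2 ^ b' := by omega
          have := hrec.mpr h2
          omega

theorem pvClog2_eq_size (m : Nat) : pvClog2 m = Nat.size (m - 1) := by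
  have hiff : ∀ b, pvClog2 m ≤ b ↔ m ≤ 2 ^ b := fun b =>
    pvClog2Aux_le_iff m m b le_rfl
  have hsz : ∀ b, Nat.size (m - 1) ≤ b ↔ m ≤ 2 ^ b := by
    intro b
    rw [Nat.size_le]
    have : (1 : Nat) ≤ 2 ^ b := Nat.one_le_two_pow
    omega
  have h1 : pvClog2 m ≤ Nat.size (m - 1) := (hiff _).mpr ((hsz _).mp le_rfl)
  have h2 : Nat.size (m - 1) ≤ pvClog2 m := (hsz _).mpr ((hiff _).mp le_rfl)
  omega

-- a doubled numerator against a doubled power of two divides to the same quotient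
theorem pvHalfPow_div (k : Nat) (hk : 1 ≤ k) :
    (450359962737049600 : Nat) / 2 ^ (k - 1) = 900719925474099200 / 2 ^ k := by
  obtain ⟨j, rfl⟩ : ∃ j, k = j + 1 := ⟨k - 1, by omega⟩
  simp only [Nat.add_sub_cancel, pow_succ]
  rw [show (900719925474099200 : Nat) = 450359962737049600 * 2 by norm_num]
  rw [Nat.mul_div_mul_right _ _ (by norm_num : (0:Nat) < 2)]

-- the two float models agree on the used domain 1 ≤ u ≤ n
theorem pvPct100_eq_pvPctB (u n : Nat) (hu : 1 ≤ u) (hun : u ≤ n) :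
    pvPct100 u n = pvPctB u n := by
  have hu0 : u ≠ 0 := by omega
  unfold pvPct100 pvPctB
  simp only [hu0, if_neg, not_false_iff, Nat.shiftLeft_eq, pvClog2_eq_size,
    pvRnde_eq_pvRndB]
  set c := (n * 2 ^ 52 + u - 1) / u with hc
  set k0 := Nat.size (c - 1) with hk0
  set m0 := pvRndB (u * 2 ^ k0) n with hm0
  by_cases hm : m0 = 2 ^ 53
  · -- renormalisation case: both sides are exact powers times 100
    -- c ≥ 2, hence k0 ≥ 1
    have hc2 : 2 ^ 52 ≤ c := by
      have h1 : u * 2 ^ 52 ≤ n * 2 ^ 52 + u - 1 := by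
        have := Nat.mul_le_mul_right (2 ^ 52) hun
        omega
      have h2 : u * 2 ^ 52 / u ≤ c := by
        rw [hc]; exact Nat.div_le_div_right h1
      rwa [Nat.mul_div_cancel_left _ (by omega)] at h2
    have hk1 : 1 ≤ k0 := by
      rw [hk0]
      have : 2 ^ 0 ≤ c - 1 := by norm_num; omega
      have := Nat.lt_size.mpr this
      omega
    simp only [hm, if_pos]
    -- A side literals
    have tA : (2 : Nat) ^ 52 * 100 = 450359962737049600 := by norm_num
    have sizeA : Nat.size ((2:Nat) ^ 52 * 100 + 1 - 1) = 59 := by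
      have hlit : (2:Nat) ^ 52 * 100 + 1 - 1 = 450359962737049600 := by norm_num
      have h1 : Nat.size (450359962737049600 : Nat) ≤ 59 := by
        rw [Nat.size_le]; norm_num
      have h2 : 58 < Nat.size (450359962737049600 : Nat) := by
        rw [Nat.lt_size]; norm_num
      rw [hlit]; omega
    -- B side literals
    have tB : (100 : Nat) * 2 ^ 53 = 900719925474099200 := by norm_num
    have sizeB : Nat.size ((100 : Nat) * 2 ^ 53) = 60 := by
      have h1 : Nat.size (900719925474099200 : Nat) ≤ 60 := by
        rw [Nat.size_le]; norm_num
      have h2 : 59 < Nat.size (900719925474099200 : Nat) := by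
        rw [Nat.lt_size]; norm_num
      rw [tB]; omega
    rw [sizeA, sizeB, tA, tB]
    norm_num [pvRndB]
    -- goal: literal/2^(k0-1) = literal/2^k0 with doubled numerator
    exact_mod_cast pvHalfPow_div k0 hk1
  · -- no renormalisation: the two computations coincide step for step
    simp only [hm, if_neg, not_false_iff, Nat.add_sub_cancel, mul_comm m0 100]

-- A's accumulation loop keeps a duplicate-free list with exactly the elements seen so far.
theorem pvFoldA_nodup_toFinset (l : List String) :
    ∀ acc : List String, acc.Nodup →
      (l.foldl (fun acc word => if word ∈ acc then acc else acc ++ [word]) acc).Nodup ∧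
      (l.foldl (fun acc word => if word ∈ acc then acc else acc ++ [word]) acc).toFinset
        = acc.toFinset ∪ l.toFinset := by
  induction l with
  | nil => intro acc h; simpa using h
  | cons x xs ih =>
    intro acc h
    simp only [List.foldl_cons]
    by_cases hx : x ∈ acc
    · rcases ih acc h with ⟨h1, h2⟩
      refine ⟨by simpa [hx] using h1, ?_⟩
      simp only [hx, if_pos]
      rw [h2]
      ext y
      simp only [Finset.mem_union, List.mem_toFinset, List.toFinset_cons, Finset.mem_insert]
      constructor
      · tauto
      · rintro (h | h | h) <;> first | exact Or.inl h | (subst h; exact Or.inl hx) | exact Or.inr h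
    · have hnd : (acc ++ [x]).Nodup := by
        rw [List.nodup_append]
        refine ⟨h, List.nodup_singleton x, ?_⟩
        intro a ha b hb
        rcases List.mem_singleton.mp hb with rfl
        exact fun h' => hx (h' ▸ ha)
      rcases ih (acc ++ [x]) hnd with ⟨h1, h2⟩
      refine ⟨by simpa [hx] using h1, ?_⟩
      simp only [hx, if_neg, not_false_iff]
      rw [h2]
      ext y
      simp [List.mem_toFinset]

-- On a ≤-sorted nonempty list, 1 + (number of adjacent unequal pairs) = number of distinct elements.
theorem pvAdjCount_sorted (s : List String) (hs : s.Pairwise (· ≤ ·)) (hne : s ≠ []) :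
    1 + (s.zip (s.drop 1)).countP (fun p => p.1 != p.2) = s.toFinset.card := by
  induction s with
  | nil => exact absurd rfl hne
  | cons x rest ih =>
    cases rest with
    | nil => simp
    | cons y t =>
      have htail : (y :: t).Pairwise (· ≤ ·) := hs.tail
      have hrec := ih htail (by simp)
      simp only [List.drop_succ_cons, List.drop_zero, List.zip_cons_cons, List.countP_cons] at hrec ⊢
      by_cases hxy : x = y
      · subst hxy
        simp only [List.toFinset_cons] at hrec ⊢
        simpa [Finset.insert_idem] using hrec
      · have hx_le : ∀ b ∈ y :: t, x ≤ b := by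
          intro b hb
          exact (List.pairwise_cons.mp hs).1 b hb
        have hxnot : x ∉ y :: t := by
          intro hmem
          rcases List.mem_cons.mp hmem with h | h
          · exact hxy h
          · have h1 : x ≤ y := hx_le y (List.mem_cons_self)
            have h2 : y ≤ x := (List.pairwise_cons.mp htail).1 x h
            exact hxy (le_antisymm h1 h2)
        have hne' : (x != y) = true := by simpa using hxy
        simp only [hne', if_pos, List.toFinset_cons] at hrec ⊢
        rw [Finset.card_insert_of_notMem (by simpa using hxnot)]
        omega

-- ===== VERDICT (by name: the statement is the Claim_ definition above) =====
theorem calculate_lyrical_uniqueness_spec : Claim_equal_calculate_lyrical_uniqueness := by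
  intro lyrics _
  unfold Spec_calculate_lyrical_uniqueness calculate_lyrical_uniqueness calculate_lyrical_uniqueness_alt
  by_cases hnil : lyrics = []
  · subst hnil; simp
  · have hlen : lyrics.length ≠ 0 := by simpa using (List.length_pos_iff.mpr hnil).ne'
    simp only [hnil, if_neg, hlen, if_neg, not_false_iff]
    -- both distinct counts equal lyrics.toFinset.card
    have hA := pvFoldA_nodup_toFinset lyrics [] (by simp)
    have hAlen :
        (lyrics.foldl (fun acc word => if word ∈ acc then acc else acc ++ [word]) []).length
          = lyrics.toFinset.card := by
      rw [← List.toFinset_card_of_nodup hA.1, hA.2]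
      simp
    set s := PySem.List.sorted lyrics (fun x => x) false with hsdef
    have hsne : s ≠ [] := by
      rw [hsdef, Ne, PySem.List.sorted_eq_nil_iff]; exact hnil
    have hsp : s.Pairwise (· ≤ ·) := PySem.List.sorted_pairwise lyrics (fun x => x)
    have hperm : s.Perm lyrics := PySem.List.sorted_perm lyrics (fun x => x) false
    have hB := pvAdjCount_sorted s hsp hsne
    rw [List.toFinset_eq_of_perm s lyrics hperm] at hB
    rw [hAlen, hB]
    -- the two float models agree on 1 ≤ card ≤ length
    have hcard_le : lyrics.toFinset.card ≤ lyrics.length := lyrics.toFinset_card_le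
    have hcard_pos : 1 ≤ lyrics.toFinset.card := by
      rw [Nat.one_le_iff_ne_zero, Ne, Finset.card_eq_zero]
      simp [hnil]
    exact pvPct100_eq_pvPctB _ _ hcard_pos hcard_le
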